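-- pv_equiv track=rewrite | github.com/bjkomer/advent-of-code | 2023/day11.py | expand_dist
-- ===== SOURCE A (Python) =====
-- def expand_dist(start, end, expand_list, expansion_amount=2):
--     dist = 0
--
--     if start > end:
--         start, end = end, start
--
--     for i in range(start, end):
--         if i in expand_list:
--             dist += expansion_amount
--         else:
--             dist += 1
--
--     return dist
-- ===== SOURCE B (Python) =====
-- def expand_dist(start, end, expand_list, expansion_amount=2):
--     lo, hi = (start, end) if start <= end else (end, start)
--     crossed = len({x for x in expand_list if lo <= x < hi})
--     return (hi - lo) + (expansion_amount - 1) * crossed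
-- ===== Notes on version B (the rewrite author's own statement) =====
-- stated objective: faster
-- what changed: Replaced A's loop over every integer in [start,end) with a membership test per step by a closed form: (hi-lo) + (expansion_amount-1) * (count of distinct expand positions inside [lo,hi)), computed in one pass over expand_list.
import Mathlib
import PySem

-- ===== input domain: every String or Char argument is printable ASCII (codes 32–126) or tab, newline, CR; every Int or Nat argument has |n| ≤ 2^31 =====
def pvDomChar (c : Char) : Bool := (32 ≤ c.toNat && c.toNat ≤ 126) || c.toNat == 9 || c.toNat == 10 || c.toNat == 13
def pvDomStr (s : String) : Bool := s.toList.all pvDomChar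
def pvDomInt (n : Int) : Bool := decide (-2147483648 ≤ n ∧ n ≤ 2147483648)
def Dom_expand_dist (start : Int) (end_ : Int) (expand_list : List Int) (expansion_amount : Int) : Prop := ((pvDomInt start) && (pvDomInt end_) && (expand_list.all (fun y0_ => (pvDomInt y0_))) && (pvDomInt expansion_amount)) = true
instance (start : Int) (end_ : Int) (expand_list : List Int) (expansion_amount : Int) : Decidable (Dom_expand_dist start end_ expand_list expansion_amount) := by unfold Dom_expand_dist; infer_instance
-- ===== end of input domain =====

-- B replaces A's loop over every integer in [start, end) by a closed form:
-- (hi - lo) + (expansion_amount - 1) * |{distinct expand positions in [lo, hi)}|  (objective: faster, asymptotic).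

-- ===== PORT A =====
def expand_dist (start : Int) (end_ : Int) (expand_list : List Int) (expansion_amount : Int) : Int :=
  -- if start > end: start, end = end, start
  let p := if start > end_ then (end_, start) else (start, end_)
  -- for i in range(start, end): dist += expansion_amount if i in expand_list else 1
  (PySem.List.pyRange p.1 p.2 1).foldl
    (fun dist i => if i ∈ expand_list then dist + expansion_amount else dist + 1) 0

-- ===== PORT B =====
def expand_dist_alt (start : Int) (end_ : Int) (expand_list : List Int) (expansion_amount : Int) : Int :=
  let lo := if start ≤ end_ then start else end_
  let hi := if start ≤ end_ then end_ else start
  -- {x for x in expand_list if lo <= x < hi}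
  let crossed : Int :=
    PySem.Set.len (PySem.Set.ofList (expand_list.filter (fun x => decide (lo ≤ x) && decide (x < hi))))
  (hi - lo) + (expansion_amount - 1) * crossed

-- ===== PRECONDITION & SPEC =====
def Spec_expand_dist (start : Int) (end_ : Int) (expand_list : List Int) (expansion_amount : Int) (out : Int) : Prop := out = expand_dist_alt start end_ expand_list expansion_amount
instance (start : Int) (end_ : Int) (expand_list : List Int) (expansion_amount : Int) (out : Int) : Decidable (Spec_expand_dist start end_ expand_list expansion_amount out) := by unfold Spec_expand_dist; infer_instance

-- ===== CLAIM (what is proved, stated in full; the proofs are below) =====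
def Claim_equal_expand_dist : Prop := ∀ (start : Int) (end_ : Int) (expand_list : List Int) (expansion_amount : Int), Dom_expand_dist start end_ expand_list expansion_amount → Spec_expand_dist start end_ expand_list expansion_amount (expand_dist start end_ expand_list expansion_amount)

-- ===== LEMMAS AND PROOFS =====

-- A's loop accumulates length + (amt-1) * (number of loop indices that hit expand_list).
theorem pv_foldA (xs : List Int) (amt : Int) :
    ∀ (L : List Int) (d : Int),
      L.foldl (fun dist i => if i ∈ xs then dist + amt else dist + 1) d
        = d + L.length + (amt - 1) * ((L.filter (fun i => decide (i ∈ xs))).length : Int) := by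
  intro L
  induction L with
  | nil => intro d; simp
  | cons a L ih =>
    intro d
    by_cases h : a ∈ xs
    · simp [List.foldl_cons, h, ih]; ring
    · simp [List.foldl_cons, h, ih]; ring

-- the in-range loop hits and the distinct in-range expand positions are the same set of integers
theorem pv_count_eq (lo hi : Int) (xs : List Int) :
    ((PySem.List.pyRange lo hi 1).filter (fun i => decide (i ∈ xs))).length
      = (PySem.Set.ofList (xs.filter (fun x => decide (lo ≤ x) && decide (x < hi)))).length := by
  apply List.Perm.length_eq
  rw [List.perm_ext_iff_of_nodup
        ((PySem.List.nodup_pyRange_one lo hi).filter _)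
        (PySem.Set.nodup_ofList _)]
  intro a
  simp [PySem.Set.mem_ofList, List.mem_filter, PySem.List.mem_pyRange_one, and_comm]

theorem pv_len_ofList {α : Type} [BEq α] (s : List α) :
    PySem.Set.len (PySem.Set.ofList s) = ((PySem.Set.ofList s).length : Int) := by
  simp [PySem.Set.len]

-- ===== VERDICT (by name: the statement is the Claim_ definition above) =====
theorem expand_dist_spec : Claim_equal_expand_dist := by
  intro start end_ xs amt _
  unfold Spec_expand_dist expand_dist expand_dist_alt
  by_cases h : start ≤ end_
  · have h' : ¬ start > end_ := by omega
    simp only [h, h', if_true, if_false, pv_foldA, pv_count_eq, pv_len_ofList,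
      PySem.List.length_pyRange_one]
    have : ((end_ - start).toNat : Int) = end_ - start := by omega
    rw [this]; ring
  · have h' : start > end_ := by omega
    simp only [h, h', if_true, if_false, pv_foldA, pv_count_eq, pv_len_ofList,
      PySem.List.length_pyRange_one]
    have : ((start - end_).toNat : Int) = start - end_ := by omega
    rw [this]; ring
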